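-- pv_equiv track=rewrite | github.com/testors/tiny_ci | scripts/install_git_hooks.py | _strip_existing_block
-- ===== SOURCE A (Python) =====
-- def _strip_existing_block(lines: list[str], project_id: str) -> list[str]:
--     cleaned: list[str] = []
--     i = 0
--     while i < len(lines):
--         line = lines[i]
--
--         if line == f"# tiny_ci: begin {project_id}":
--             i += 1
--             while i < len(lines) and lines[i] != f"# tiny_ci: end {project_id}":
--                 i += 1
--             if i < len(lines):
--                 i += 1
--             continue
--
--         if line.startswith("# tiny_ci: auto-build ") and i + 1 < len(lines):
--             next_line = lines[i + 1]
--             if (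
--                 ("build.sh" in next_line or "trigger.sh" in next_line)
--                 and project_id in next_line
--             ):
--                 i += 2
--                 continue
--
--         cleaned.append(line)
--         i += 1
--
--     while cleaned and cleaned[-1] == "":
--         cleaned.pop()
--     return cleaned
-- ===== SOURCE B (Python) =====
-- def _strip_existing_block(lines: list[str], project_id: str) -> list[str]:
--     begin_marker = f"# tiny_ci: begin {project_id}"
--     end_marker = f"# tiny_ci: end {project_id}"
--     n = len(lines)
--     keep: list[tuple[int, int]] = []  # half-open index intervals of kept lines
--     seg = 0
--     i = 0
--     while i < n:
--         if lines[i] == begin_marker: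
--             keep.append((seg, i))
--             try:
--                 i = lines.index(end_marker, i + 1) + 1
--             except ValueError:
--                 i = n
--             seg = i
--         elif (
--             lines[i].startswith("# tiny_ci: auto-build ")
--             and i + 1 < n
--             and ("build.sh" in lines[i + 1] or "trigger.sh" in lines[i + 1])
--             and project_id in lines[i + 1]
--         ):
--             keep.append((seg, i))
--             i += 2
--             seg = i
--         else:
--             i += 1
--     keep.append((seg, n))
--     cleaned = [line for a, b in keep for line in lines[a:b]]
--     stop = len(cleaned)
--     while stop > 0 and cleaned[stop - 1] == "":
--         stop -= 1
--     return cleaned[:stop]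
-- ===== Notes on version B (the rewrite author's own statement) =====
-- stated objective: alternative
-- what changed: B records half-open keep-intervals of indices (locating the end marker with list.index) and materializes the result by slice concatenation at the end, instead of A's per-line appends inside nested index-advancing while loops; the trailing-empty trim computes a stop index and slices instead of popping.
import Mathlib
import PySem

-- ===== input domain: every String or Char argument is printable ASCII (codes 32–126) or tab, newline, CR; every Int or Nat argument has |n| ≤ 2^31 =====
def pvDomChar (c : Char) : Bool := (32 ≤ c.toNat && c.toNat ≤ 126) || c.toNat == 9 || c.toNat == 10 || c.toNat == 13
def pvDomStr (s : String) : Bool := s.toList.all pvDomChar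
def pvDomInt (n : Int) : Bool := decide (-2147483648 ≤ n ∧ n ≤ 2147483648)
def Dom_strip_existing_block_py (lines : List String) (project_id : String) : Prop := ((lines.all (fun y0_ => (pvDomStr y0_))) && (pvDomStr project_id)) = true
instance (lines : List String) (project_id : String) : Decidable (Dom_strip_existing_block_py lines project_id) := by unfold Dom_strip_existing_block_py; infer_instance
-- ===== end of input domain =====

-- B records half-open keep-intervals of indices (end marker located with list.index) and
-- materializes the kept lines by slice concatenation, instead of A's per-line appends in
-- nested index-advancing loops; objective: alternative decomposition, same asymptotic cost.

-- ===== PORT A =====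
-- inner 'while i < len(lines) and lines[i] != end_marker: i += 1' — returns the stopping index
def pvSkipA (lines : List String) (pid : String) (i : Nat) : Nat :=
  if h : i < lines.length then
    if lines[i] ≠ "# tiny_ci: end " ++ pid then pvSkipA lines pid (i + 1) else i
  else i
termination_by lines.length - i
decreasing_by omega

-- the outer while loop needs this bound for termination
theorem pvSkipA_ge (lines : List String) (pid : String) (i : Nat) : i ≤ pvSkipA lines pid i := by
  unfold pvSkipA
  split_ifs with h1 h2
  · have := pvSkipA_ge lines pid (i + 1); omega
  · omega
  · omega
termination_by lines.length - i
decreasing_by omega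

-- A's 'while cleaned and cleaned[-1] == "": cleaned.pop()'
def pvTrim (cleaned : List String) : List String :=
  if h : cleaned.getLast? = some "" then pvTrim cleaned.dropLast else cleaned
termination_by cleaned.length
decreasing_by
  rcases cleaned with _ | ⟨x, xs⟩
  · simp at h
  · simp [List.length_dropLast]

-- the outer while loop of A, index-driven, appending kept lines one by one
def pvLoopA (lines : List String) (pid : String) (i : Nat) (cleaned : List String) : List String :=
  if h : i < lines.length then
    let line := lines[i]
    if line = "# tiny_ci: begin " ++ pid then
      let j := pvSkipA lines pid (i + 1)
      pvLoopA lines pid (if j < lines.length then j + 1 else j) cleaned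
    else if h2 : PySem.Str.startswith line "# tiny_ci: auto-build " = true ∧ i + 1 < lines.length then
      let next_line := lines[i + 1]'h2.2
      if (PySem.Str.isIn "build.sh" next_line || PySem.Str.isIn "trigger.sh" next_line)
          && PySem.Str.isIn pid next_line then
        pvLoopA lines pid (i + 2) cleaned
      else
        pvLoopA lines pid (i + 1) (cleaned ++ [line])
    else
      pvLoopA lines pid (i + 1) (cleaned ++ [line])
  else cleaned
termination_by lines.length - i
decreasing_by
  all_goals first
    | omega
    | (have := pvSkipA_ge lines pid (i + 1); split_ifs <;> omega)

def strip_existing_block_py (lines : List String) (project_id : String) : List String :=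
  pvTrim (pvLoopA lines project_id 0 [])

-- ===== PORT B =====
-- port of Source B's 'lines.index(end_marker, i + 1) + 1' with its try/except (ValueError → i = n);
-- the stdlib list.index(x, start) call is ported as findIdx? on the dropped suffix
def pvNextAfterBlock (lines : List String) (pid : String) (i : Nat) : Nat :=
  match (lines.drop (i + 1)).findIdx? (fun l => l = "# tiny_ci: end " ++ pid) with
  | some j => i + 1 + j + 1
  | none => lines.length

theorem pvNextAfterBlock_gt (lines : List String) (pid : String) (i : Nat)
    (h : i < lines.length) : i < pvNextAfterBlock lines pid i := by
  unfold pvNextAfterBlock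
  cases (lines.drop (i + 1)).findIdx? (fun l => l = "# tiny_ci: end " ++ pid) with
  | none => simpa using h
  | some j => simp; omega

-- Source B's while loop collecting half-open keep-intervals (seg = start of current segment)
def pvLoopBAlt (lines : List String) (pid : String) (i seg : Nat)
    (keep : List (Nat × Nat)) : List (Nat × Nat) :=
  if h : i < lines.length then
    if lines[i] = "# tiny_ci: begin " ++ pid then
      let i' := pvNextAfterBlock lines pid i
      pvLoopBAlt lines pid i' i' (keep ++ [(seg, i)])
    else if PySem.Str.startswith lines[i] "# tiny_ci: auto-build " && decide (i + 1 < lines.length)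
        && ((PySem.Str.isIn "build.sh" (lines.getD (i + 1) "")
              || PySem.Str.isIn "trigger.sh" (lines.getD (i + 1) ""))
            && PySem.Str.isIn pid (lines.getD (i + 1) "")) then
      pvLoopBAlt lines pid (i + 2) (i + 2) (keep ++ [(seg, i)])
    else
      pvLoopBAlt lines pid (i + 1) seg keep
  else keep ++ [(seg, lines.length)]
termination_by lines.length - i
decreasing_by
  all_goals first
    | omega
    | (have := pvNextAfterBlock_gt lines pid i (by omega); omega)

-- Python lines[a:b] for natural a ≤ b within range: exact (no negative indices occur)
def pvSliceNat (lines : List String) (a b : Nat) : List String :=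
  (lines.drop a).take (b - a)

-- the comprehension '[line for a, b in keep for line in lines[a:b]]'
def pvMaterialize (lines : List String) (keep : List (Nat × Nat)) : List String :=
  keep.flatMap (fun p => pvSliceNat lines p.1 p.2)

-- 'while stop > 0 and cleaned[stop - 1] == "": stop -= 1' (stop stays ≤ len, so getD is exact)
def pvStop (cleaned : List String) (stop : Nat) : Nat :=
  if 0 < stop ∧ cleaned.getD (stop - 1) "" = "" then pvStop cleaned (stop - 1) else stop
termination_by stop
decreasing_by omega

def strip_existing_block_py_alt (lines : List String) (project_id : String) : List String :=
  let cleaned := pvMaterialize lines (pvLoopBAlt lines project_id 0 0 [])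
  cleaned.take (pvStop cleaned cleaned.length)

-- ===== PRECONDITION & SPEC =====
def Spec_strip_existing_block_py (lines : List String) (project_id : String) (out : List String) : Prop := out = strip_existing_block_py_alt lines project_id
instance (lines : List String) (project_id : String) (out : List String) : Decidable (Spec_strip_existing_block_py lines project_id out) := by unfold Spec_strip_existing_block_py; infer_instance

-- ===== CLAIM (what is proved, stated in full; the proofs are below) =====
def Claim_equal_strip_existing_block_py : Prop := ∀ (lines : List String) (project_id : String), Dom_strip_existing_block_py lines project_id → Spec_strip_existing_block_py lines project_id (strip_existing_block_py lines project_id)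

-- ===== LEMMAS AND PROOFS =====

-- A's loop threads the accumulator by appending only
theorem pvLoopA_acc (lines : List String) (pid : String) :
    ∀ n i c, lines.length - i ≤ n →
      pvLoopA lines pid i c = c ++ pvLoopA lines pid i [] := by
  intro n
  induction n with
  | zero =>
    intro i c hle
    have hni : ¬ i < lines.length := by omega
    have e : ∀ c' : List String, pvLoopA lines pid i c' = c' := by
      intro c'; rw [pvLoopA.eq_def]; rw [dif_neg hni]
    rw [e, e]; simp
  | succ n ih =>
    intro i c hle
    by_cases hi : i < lines.length
    case neg =>
      have e : ∀ c' : List String, pvLoopA lines pid i c' = c' := by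
        intro c'; rw [pvLoopA.eq_def]; rw [dif_neg hi]
      rw [e, e]; simp
    case pos =>
    rw [pvLoopA.eq_def]
    conv_rhs => rw [pvLoopA.eq_def]
    simp only [dif_pos hi]
    by_cases hb : lines[i] = "# tiny_ci: begin " ++ pid
    · simp only [if_pos hb]
      have hjge := pvSkipA_ge lines pid (i + 1)
      by_cases hjl : pvSkipA lines pid (i + 1) < lines.length
      · simp only [if_pos hjl]
        exact ih (pvSkipA lines pid (i + 1) + 1) c (by omega)
      · simp only [if_neg hjl]
        have e : ∀ c' : List String, pvLoopA lines pid (pvSkipA lines pid (i + 1)) c' = c' := by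
          intro c'; rw [pvLoopA.eq_def]; rw [dif_neg hjl]
        rw [e, e]; simp
    · simp only [if_neg hb]
      by_cases h2 : PySem.Str.startswith lines[i] "# tiny_ci: auto-build " = true ∧ i + 1 < lines.length
      · simp only [dif_pos h2]
        by_cases hin : ((PySem.Str.isIn "build.sh" (lines[i + 1]'h2.2)
              || PySem.Str.isIn "trigger.sh" (lines[i + 1]'h2.2))
            && PySem.Str.isIn pid (lines[i + 1]'h2.2)) = true
        · simp only [if_pos hin]
          exact ih (i + 2) c (by omega)
        · simp only [if_neg hin]
          rw [ih (i + 1) (c ++ [lines[i]]) (by omega),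
              ih (i + 1) ([] ++ [lines[i]]) (by omega)]
          simp
      · simp only [dif_neg h2]
        rw [ih (i + 1) (c ++ [lines[i]]) (by omega),
            ih (i + 1) ([] ++ [lines[i]]) (by omega)]
        simp

-- B's index search agrees with A's inner scan-and-step ('skip to end marker, step past it if found')
theorem pvNextAfterBlock_skip (lines : List String) (pid : String) :
    ∀ n k, lines.length - k ≤ n → k ≤ lines.length →
      (match (lines.drop k).findIdx? (fun l => l = "# tiny_ci: end " ++ pid) with
        | some j => k + j + 1
        | none => lines.length)
      = (if pvSkipA lines pid k < lines.length then pvSkipA lines pid k + 1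
         else pvSkipA lines pid k) := by
  intro n
  induction n with
  | zero =>
    intro k hle hk
    have hni : ¬ k < lines.length := by omega
    have hs : pvSkipA lines pid k = k := by
      rw [pvSkipA.eq_def]; rw [dif_neg hni]
    rw [List.drop_eq_nil_of_le (by omega), hs, if_neg hni]
    simp; omega
  | succ n ih =>
    intro k hle hk
    by_cases hkl : k < lines.length
    case neg =>
      have hs : pvSkipA lines pid k = k := by
        rw [pvSkipA.eq_def]; rw [dif_neg hkl]
      rw [List.drop_eq_nil_of_le (by omega), hs, if_neg hkl]
      simp; omega
    case pos =>
    have hd : lines.drop k = lines[k] :: lines.drop (k + 1) := List.drop_eq_getElem_cons hkl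
    by_cases he : lines[k] = "# tiny_ci: end " ++ pid
    · have hs : pvSkipA lines pid k = k := by
        rw [pvSkipA.eq_def]; rw [dif_pos hkl]; rw [if_neg (by simp [he])]
      rw [hd, List.findIdx?_cons, hs]
      simp [he, hkl]
    · have hs : pvSkipA lines pid k = pvSkipA lines pid (k + 1) := by
        rw [pvSkipA.eq_def]; rw [dif_pos hkl]; rw [if_pos (by simp [he])]
      have hih := ih (k + 1) (by omega) (by omega)
      rw [hd, List.findIdx?_cons, hs]
      simp only [he, decide_false]
      cases hf : (lines.drop (k + 1)).findIdx? (fun l => decide (l = "# tiny_ci: end " ++ pid)) with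
      | none =>
        rw [hf] at hih
        simpa using hih
      | some j =>
        rw [hf] at hih
        have hih' : k + 1 + j + 1
            = (if pvSkipA lines pid (k + 1) < lines.length then pvSkipA lines pid (k + 1) + 1
               else pvSkipA lines pid (k + 1)) := hih
        simp only [show (false = true) = False by simp, if_false]
        show k + (j + 1) + 1 = _
        omega

-- pvSkipA never overshoots the length
theorem pvSkipA_le (lines : List String) (pid : String) (i : Nat) (h : i <= lines.length) :
    pvSkipA lines pid i <= lines.length := by
  unfold pvSkipA
  split_ifs with h1 h2
  . exact pvSkipA_le lines pid (i + 1) (by omega)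
  . omega
  . omega
termination_by lines.length - i
decreasing_by omega

theorem pvMaterialize_append (lines : List String) (k1 k2 : List (Nat × Nat)) :
    pvMaterialize lines (k1 ++ k2) = pvMaterialize lines k1 ++ pvMaterialize lines k2 := by
  simp [pvMaterialize]

theorem pvSliceNat_refl (lines : List String) (a : Nat) : pvSliceNat lines a a = [] := by
  simp [pvSliceNat]

theorem pvSliceNat_snoc (lines : List String) (seg i : Nat) (h1 : seg <= i)
    (h2 : i < lines.length) :
    pvSliceNat lines seg (i + 1) = pvSliceNat lines seg i ++ [lines[i]] := by
  unfold pvSliceNat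
  have e1 : i + 1 - seg = (i - seg) + 1 := by omega
  rw [e1, List.take_succ]
  have hg : (lines.drop seg)[i - seg]? = some lines[i] := by
    rw [List.getElem?_drop]
    have e2 : seg + (i - seg) = i := by omega
    rw [e2]
    exact List.getElem?_eq_getElem h2
  rw [hg]
  rfl

-- main loop invariant: B's interval collection materializes to A's per-line accumulation
theorem pvLoopB_eq (lines : List String) (pid : String) :
    ∀ n i seg keep, lines.length - i <= n → seg <= i → i <= lines.length →
      pvMaterialize lines (pvLoopBAlt lines pid i seg keep)
        = pvMaterialize lines keep ++ pvSliceNat lines seg i ++ pvLoopA lines pid i [] := by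
  intro n
  induction n with
  | zero =>
    intro i seg keep hle hsi hil
    have hi : i = lines.length := by omega
    have hni : ¬ i < lines.length := by omega
    have hA : pvLoopA lines pid i [] = [] := by
      rw [pvLoopA.eq_def]; rw [dif_neg hni]
    rw [pvLoopBAlt.eq_def]; rw [dif_neg hni, pvMaterialize_append, hA]
    subst hi
    simp [pvMaterialize]
  | succ n ih =>
    intro i seg keep hle hsi hil
    by_cases hi : i < lines.length
    case neg =>
      have hieq : i = lines.length := by omega
      have hA : pvLoopA lines pid i [] = [] := by
        rw [pvLoopA.eq_def]; rw [dif_neg hi]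
      rw [pvLoopBAlt.eq_def]; rw [dif_neg hi, pvMaterialize_append, hA]
      subst hieq
      simp [pvMaterialize]
    case pos =>
    rw [pvLoopBAlt.eq_def]; rw [dif_pos hi]
    by_cases hb : lines[i] = "# tiny_ci: begin " ++ pid
    . -- begin marker: B closes the segment and jumps past the end marker
      simp only [if_pos hb]
      have hnext : pvNextAfterBlock lines pid i
          = (if pvSkipA lines pid (i + 1) < lines.length then pvSkipA lines pid (i + 1) + 1
             else pvSkipA lines pid (i + 1)) := by
        have h := pvNextAfterBlock_skip lines pid lines.length (i + 1) (by omega) (by omega)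
        unfold pvNextAfterBlock
        exact h
      have hskle : pvSkipA lines pid (i + 1) <= lines.length := pvSkipA_le lines pid (i + 1) (by omega)
      have hskge : i + 1 <= pvSkipA lines pid (i + 1) := pvSkipA_ge lines pid (i + 1)
      have hgt : i < pvNextAfterBlock lines pid i := pvNextAfterBlock_gt lines pid i hi
      have hle2 : pvNextAfterBlock lines pid i <= lines.length := by
        rw [hnext]; split_ifs <;> omega
      rw [ih (pvNextAfterBlock lines pid i) (pvNextAfterBlock lines pid i) (keep ++ [(seg, i)])
            (by omega) (le_refl _) hle2]
      rw [pvMaterialize_append, pvSliceNat_refl]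
      conv_rhs => rw [pvLoopA.eq_def]
      simp only [dif_pos hi, if_pos hb]
      rw [← hnext]
      simp [pvMaterialize]
    . simp only [if_neg hb]
      by_cases h2 : PySem.Str.startswith lines[i] "# tiny_ci: auto-build " = true ∧ i + 1 < lines.length
      . have hg : lines.getD (i + 1) "" = lines[i + 1]'h2.2 := List.getD_eq_getElem lines "" h2.2
        by_cases hin : ((PySem.Str.isIn "build.sh" (lines[i + 1]'h2.2)
              || PySem.Str.isIn "trigger.sh" (lines[i + 1]'h2.2))
            && PySem.Str.isIn pid (lines[i + 1]'h2.2)) = true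
        . -- auto-build pair dropped: B closes the segment before the marker
          have hcond : (PySem.Str.startswith lines[i] "# tiny_ci: auto-build "
                && decide (i + 1 < lines.length)
                && ((PySem.Str.isIn "build.sh" (lines.getD (i + 1) "")
                      || PySem.Str.isIn "trigger.sh" (lines.getD (i + 1) ""))
                    && PySem.Str.isIn pid (lines.getD (i + 1) ""))) = true := by
            obtain ⟨h21, h22⟩ := id h2
            rw [hg]
            simp only [h21, hin, Bool.true_and, Bool.and_true, decide_eq_true_eq]
            exact h22
          rw [if_pos hcond]
          rw [ih (i + 2) (i + 2) (keep ++ [(seg, i)]) (by omega) (le_refl _) (by omega)]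
          rw [pvMaterialize_append, pvSliceNat_refl]
          conv_rhs => rw [pvLoopA.eq_def]
          simp only [dif_pos hi, if_neg hb, dif_pos h2, if_pos hin]
          simp [pvMaterialize]
        . have hcond : (PySem.Str.startswith lines[i] "# tiny_ci: auto-build "
                && decide (i + 1 < lines.length)
                && ((PySem.Str.isIn "build.sh" (lines.getD (i + 1) "")
                      || PySem.Str.isIn "trigger.sh" (lines.getD (i + 1) ""))
                    && PySem.Str.isIn pid (lines.getD (i + 1) ""))) = false := by
            rw [hg, eq_false_of_ne_true hin]; simp
          rw [if_neg (by simp only [hcond]; simp)]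
          rw [ih (i + 1) seg keep (by omega) (by omega) (by omega)]
          conv_rhs => rw [pvLoopA.eq_def]
          simp only [dif_pos hi, if_neg hb, dif_pos h2, if_neg hin]
          rw [pvLoopA_acc lines pid lines.length (i + 1) ([] ++ [lines[i]]) (by omega)]
          rw [pvSliceNat_snoc lines seg i hsi hi]
          simp
      . rw [if_neg (by
            intro hcond
            simp only [Bool.and_eq_true, decide_eq_true_eq] at hcond
            exact h2 ⟨hcond.1.1, hcond.1.2⟩)]
        rw [ih (i + 1) seg keep (by omega) (by omega) (by omega)]
        conv_rhs => rw [pvLoopA.eq_def]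
        simp only [dif_pos hi, if_neg hb, dif_neg h2]
        rw [pvLoopA_acc lines pid lines.length (i + 1) ([] ++ [lines[i]]) (by omega)]
        rw [pvSliceNat_snoc lines seg i hsi hi]
        simp

-- pvStop only decreases
theorem pvStop_le (c : List String) (k : Nat) : pvStop c k <= k := by
  unfold pvStop
  split_ifs with h
  . have := pvStop_le c (k - 1); omega
  . omega
termination_by k
decreasing_by omega

-- pvStop only inspects entries below its argument
theorem pvStop_congr (c c' : List String) :
    ∀ k, (∀ j, j < k → c.getD j "" = c'.getD j "") → pvStop c k = pvStop c' k := by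
  intro k
  induction k with
  | zero =>
    intro _
    rw [pvStop.eq_def]
    conv_rhs => rw [pvStop.eq_def]
    simp
  | succ k ih =>
    intro hag
    rw [pvStop.eq_def]
    conv_rhs => rw [pvStop.eq_def]
    simp only [Nat.add_sub_cancel]
    rw [hag k (by omega)]
    split_ifs with h
    . simpa using ih (fun j hj => hag j (by omega))
    . rfl

-- the two trailing-empty trims agree
theorem pvTrim_eq (c : List String) : pvTrim c = c.take (pvStop c c.length) := by
  rw [pvTrim.eq_def]
  split_ifs with h
  . have hne : c ≠ [] := by rintro rfl; simp at h
    have hlen : 0 < c.length := List.length_pos_iff.mpr hne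
    have hlast : c.getD (c.length - 1) "" = "" := by
      rw [List.getD_eq_getElem?_getD, ← List.getLast?_eq_getElem?, h]
      rfl
    have step : pvStop c c.length = pvStop c (c.length - 1) := by
      rw [pvStop.eq_def]
      rw [if_pos ⟨hlen, hlast⟩]
    have hdl : c.dropLast.length = c.length - 1 := List.length_dropLast
    have hcg : pvStop c (c.length - 1) = pvStop c.dropLast (c.length - 1) := by
      refine pvStop_congr c c.dropLast (c.length - 1) (fun j hj => ?_)
      rw [List.getD_eq_getElem?_getD, List.getD_eq_getElem?_getD, List.getElem?_dropLast,
        if_pos hj]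
    have hih := pvTrim_eq c.dropLast
    rw [hih, hdl, step, hcg]
    set s := pvStop c.dropLast (c.length - 1) with hsdef
    have hs : s <= c.length - 1 := pvStop_le _ _
    rw [List.dropLast_eq_take, List.take_take]
    congr 1
    omega
  . have hstop : pvStop c c.length = c.length := by
      rw [pvStop.eq_def]
      rw [if_neg ?_]
      rintro ⟨hlen, hlast⟩
      apply h
      rw [List.getD_eq_getElem?_getD, ← List.getLast?_eq_getElem?] at hlast
      cases hg : c.getLast? with
      | none => rw [List.getLast?_eq_none_iff] at hg; subst hg; simp at hlen
      | some x => rw [hg] at hlast; simp at hlast; rw [hlast]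
    rw [hstop, List.take_length]
termination_by c.length
decreasing_by
  rcases c with _ | ⟨x, xs⟩
  . simp at h
  . simp [List.length_dropLast]

-- ===== VERDICT (by name: the statement is the Claim_ definition above) =====
theorem strip_existing_block_py_spec : Claim_equal_strip_existing_block_py := by
  intro lines pid _
  unfold Spec_strip_existing_block_py strip_existing_block_py strip_existing_block_py_alt
  have h : pvMaterialize lines (pvLoopBAlt lines pid 0 0 []) = pvLoopA lines pid 0 [] := by
    simpa [pvMaterialize, pvSliceNat] using
      pvLoopB_eq lines pid lines.length 0 0 [] (by omega) (by omega) (by omega)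
  show pvTrim (pvLoopA lines pid 0 [])
      = (pvMaterialize lines (pvLoopBAlt lines pid 0 0 [])).take
          (pvStop (pvMaterialize lines (pvLoopBAlt lines pid 0 0 []))
            (pvMaterialize lines (pvLoopBAlt lines pid 0 0 [])).length)
  rw [h, pvTrim_eq]
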